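-- pv_equiv track=rewrite | github.com/pranpublicity-creator/Equity-Trading-Terminal | app.py | _classify_pattern_shape
-- ===== SOURCE A (Python) =====
-- def _classify_pattern_shape(pattern_name: str) -> str:
--     """Map pattern name → shape class used by the chart overlay renderer."""
--     n = pattern_name.lower()
--     if any(k in n for k in ("triangle", "wedge", "pennant", "diamond", "broadening")):
--         return "triangle"
--     if "rectangle" in n:
--         return "rectangle"
--     if any(k in n for k in ("flag", "channel", "cup")):
--         return "channel"
--     if any(k in n for k in ("head_shoulder", "double_top", "double_bottom",
--                              "triple_top", "triple_bottom", "rounding")):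
--         return "hs"
--     return "horizontal"
-- ===== SOURCE B (Python) =====
-- # Min-rank aggregation: collect the ranks of ALL keywords found in the name
-- # (flat keyword -> priority-rank map), then return the label of the smallest
-- # rank; no ordered short-circuit chain.
-- _KEYWORD_RANK = {
--     "triangle": 0, "wedge": 0, "pennant": 0, "diamond": 0, "broadening": 0,
--     "rectangle": 1,
--     "flag": 2, "channel": 2, "cup": 2,
--     "head_shoulder": 3, "double_top": 3, "double_bottom": 3,
--     "triple_top": 3, "triple_bottom": 3, "rounding": 3,
-- }
-- _SHAPE_LABELS = ["triangle", "rectangle", "channel", "hs"]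
--
--
-- def _classify_pattern_shape(pattern_name: str) -> str:
--     n = pattern_name.lower()
--     ranks = [rank for kw, rank in _KEYWORD_RANK.items() if kw in n]
--     return _SHAPE_LABELS[min(ranks)] if ranks else "horizontal"
-- ===== Notes on version B (the rewrite author's own statement) =====
-- stated objective: alternative
-- what changed: Instead of an ordered if-chain with short-circuit group tests, B collects the ranks of ALL keywords found via a flat keyword->rank map and returns the label of the minimum rank (default 'horizontal' when no keyword matches).
import Mathlib
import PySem

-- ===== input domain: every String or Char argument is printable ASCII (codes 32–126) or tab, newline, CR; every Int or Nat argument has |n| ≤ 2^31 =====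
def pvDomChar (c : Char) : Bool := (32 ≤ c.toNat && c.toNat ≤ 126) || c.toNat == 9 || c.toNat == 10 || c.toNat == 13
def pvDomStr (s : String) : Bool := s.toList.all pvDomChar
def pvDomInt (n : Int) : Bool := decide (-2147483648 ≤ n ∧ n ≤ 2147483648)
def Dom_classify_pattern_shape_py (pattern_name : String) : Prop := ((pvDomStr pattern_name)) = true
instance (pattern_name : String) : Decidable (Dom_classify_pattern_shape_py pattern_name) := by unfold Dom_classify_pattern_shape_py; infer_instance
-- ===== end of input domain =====

-- B replaces A's ordered if-chain by a flat keyword->rank map aggregated with min over all matches; alternative, same cost.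


-- ===== PORT A =====
def classify_pattern_shape_py (pattern_name : String) : String :=
  let n := PySem.Str.lower pattern_name
  if ["triangle", "wedge", "pennant", "diamond", "broadening"].any (fun k => PySem.Str.isIn k n) then
    "triangle"
  else if PySem.Str.isIn "rectangle" n then
    "rectangle"
  else if ["flag", "channel", "cup"].any (fun k => PySem.Str.isIn k n) then
    "channel"
  else if ["head_shoulder", "double_top", "double_bottom",
           "triple_top", "triple_bottom", "rounding"].any (fun k => PySem.Str.isIn k n) then
    "hs"
  else
    "horizontal"

-- ===== PORT B =====
-- flat keyword -> rank map (dict in insertion order) and rank -> label table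
def pvKeywordRank : List (String × Int) :=
  [ ("triangle", 0), ("wedge", 0), ("pennant", 0), ("diamond", 0), ("broadening", 0),
    ("rectangle", 1),
    ("flag", 2), ("channel", 2), ("cup", 2),
    ("head_shoulder", 3), ("double_top", 3), ("double_bottom", 3),
    ("triple_top", 3), ("triple_bottom", 3), ("rounding", 3) ]

def pvShapeLabels : List String := ["triangle", "rectangle", "channel", "hs"]

def classify_pattern_shape_py_alt (pattern_name : String) : String :=
  let n := PySem.Str.lower pattern_name
  let ranks := pvKeywordRank.filterMap (fun p => if PySem.Str.isIn p.1 n then some p.2 else none)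
  match PySem.List.min? ranks (fun r => r) with
  | some r => (PySem.List.pyGet? pvShapeLabels r).getD ""   -- unreachable default: r ∈ {0,1,2,3}
  | none => "horizontal"

-- ===== PRECONDITION & SPEC =====
def Spec_classify_pattern_shape_py (pattern_name : String) (out : String) : Prop := out = classify_pattern_shape_py_alt pattern_name
instance (pattern_name : String) (out : String) : Decidable (Spec_classify_pattern_shape_py pattern_name out) := by unfold Spec_classify_pattern_shape_py; infer_instance

-- ===== CLAIM =====
def Claim_equal_classify_pattern_shape_py : Prop := ∀ (pattern_name : String), Dom_classify_pattern_shape_py pattern_name → Spec_classify_pattern_shape_py pattern_name (classify_pattern_shape_py pattern_name)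

-- ===== LEMMAS AND PROOFS =====
-- Both ports depend on the input only through the 15 Booleans "keyword ∈ n";
-- abstract those and check all 2^15 cases by decide.
set_option maxHeartbeats 2000000 in
theorem pvCore : ∀ (b1 b2 b3 b4 b5 c r1 r2 r3 d1 d2 d3 d4 d5 d6 : Bool),
    (if b1 || (b2 || (b3 || (b4 || (b5 || false)))) then "triangle"
     else if c then "rectangle"
     else if r1 || (r2 || (r3 || false)) then "channel"
     else if d1 || (d2 || (d3 || (d4 || (d5 || (d6 || false))))) then "hs"
     else "horizontal")
    = (match PySem.List.min?
          (List.filterMap (fun p : Bool × Int => if p.1 then some p.2 else none)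
            [ (b1, 0), (b2, 0), (b3, 0), (b4, 0), (b5, 0),
              (c, 1),
              (r1, 2), (r2, 2), (r3, 2),
              (d1, 3), (d2, 3), (d3, 3), (d4, 3), (d5, 3), (d6, 3) ])
          (fun r => r) with
       | some r => (PySem.List.pyGet? pvShapeLabels r).getD ""
       | none => "horizontal") := by
  decide

-- bridge: A/B depend on n only through the 15 membership Booleans
theorem pvMain (n : String) :
    (if ["triangle", "wedge", "pennant", "diamond", "broadening"].any (fun k => PySem.Str.isIn k n) then
       "triangle"
     else if PySem.Str.isIn "rectangle" n then "rectangle"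
     else if ["flag", "channel", "cup"].any (fun k => PySem.Str.isIn k n) then "channel"
     else if ["head_shoulder", "double_top", "double_bottom",
              "triple_top", "triple_bottom", "rounding"].any (fun k => PySem.Str.isIn k n) then "hs"
     else "horizontal")
    = (match PySem.List.min?
          (pvKeywordRank.filterMap (fun p => if PySem.Str.isIn p.1 n then some p.2 else none))
          (fun r => r) with
       | some r => (PySem.List.pyGet? pvShapeLabels r).getD ""
       | none => "horizontal") := by
  have h : pvKeywordRank.filterMap (fun p => if PySem.Str.isIn p.1 n then some p.2 else none)
      = List.filterMap (fun p : Bool × Int => if p.1 then some p.2 else none)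
          (pvKeywordRank.map (fun p => (PySem.Str.isIn p.1 n, p.2))) := by
    rw [List.filterMap_map]; rfl
  rw [h]
  simp only [pvKeywordRank, List.map, List.any]
  exact pvCore _ _ _ _ _ _ _ _ _ _ _ _ _ _ _

-- ===== VERDICT =====
theorem classify_pattern_shape_py_spec : Claim_equal_classify_pattern_shape_py := by
  intro pattern_name _
  unfold Spec_classify_pattern_shape_py classify_pattern_shape_py classify_pattern_shape_py_alt
  exact pvMain _
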